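-- pv_equiv track=rewrite | github.com/nurfariezza/gatewaysystem_py3 | gatewaynum/utils.py | simpledecrypt
-- ===== SOURCE A (Python) =====
-- def simpledecrypt(s, seed):
--     psw = hex2string(s)
--     sb = []
--
--     for c in psw:
--         value = ord(c)
--         value += seed
--         ch = chr(value)
--         sb.append(ch)
--
--     return ''.join(sb)
--
-- def hex2string(strhex):
--     n = len(strhex)
--     sb = []
--
--     if (n % 2) != 0:
--         raise UIException('Data string is corrupted.  Cannot be Decrypted.')
--
--     i = 0
--     while i < n:
--         hexvalue = strhex[i:i + 2]
--         value = int(hexvalue, 16)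
--         charvalue = chr(value)
--         sb.append(charvalue)
--         i += 2
--
--     return ''.join(sb)
--
-- class UIException(Exception):
--     pass
-- ===== SOURCE B (Python) =====
-- class UIException(Exception):
--     pass
--
-- def simpledecrypt(s, seed):
--     if len(s) % 2 != 0:
--         raise UIException('Data string is corrupted.  Cannot be Decrypted.')
--     out = []
--     for i in range(0, len(s), 2):
--         out.append(chr(int(s[i:i + 2], 16) + seed))
--     return ''.join(out)
-- ===== Notes on version B (the rewrite author's own statement) =====
-- stated objective: simpler
-- what changed: B fuses A's two passes (hex2string building an intermediate decoded string, then a shift loop re-reading it with ord/chr) into one single loop over the hex pairs that decodes and shifts each pair directly, with no intermediate string and no helper.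
import Mathlib
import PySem

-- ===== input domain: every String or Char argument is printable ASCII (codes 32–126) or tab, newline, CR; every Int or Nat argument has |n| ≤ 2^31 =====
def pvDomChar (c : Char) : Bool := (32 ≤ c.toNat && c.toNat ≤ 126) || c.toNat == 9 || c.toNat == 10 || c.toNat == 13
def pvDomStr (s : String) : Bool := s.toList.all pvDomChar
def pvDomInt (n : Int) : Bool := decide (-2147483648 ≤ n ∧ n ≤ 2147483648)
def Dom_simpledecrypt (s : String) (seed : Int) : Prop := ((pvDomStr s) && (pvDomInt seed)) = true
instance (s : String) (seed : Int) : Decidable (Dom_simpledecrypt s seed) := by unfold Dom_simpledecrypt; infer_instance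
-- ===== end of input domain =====

-- B fuses A's two passes (hex decode into an intermediate string, then an ord/chr shift loop)
-- into one loop over the hex pairs; objective: simpler. Equivalence is about the return value.

-- ===== PORT A =====
-- chr(v): some for 0 ≤ v ≤ 0x10FFFF and v representable as a Lean Char (surrogates excluded by Pre_), none = ValueError
def pyChr? (v : Int) : Option Char :=
  if 0 ≤ v ∧ (v < 55296 ∨ (57344 ≤ v ∧ v ≤ 1114111)) then some (Char.ofNat v.toNat) else none

-- the while-loop of hex2string: i advances by 2, sb accumulates the decoded chars
def hex2stringGo (strhex : List Char) (n i : Nat) (sb : List Char) : Option (List Char) :=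
  if _h : i < n then
    match PySem.Int.ofCharsBase? (PySem.List.slice strhex (some (i : Int)) (some ((i : Int) + 2))) 16 with
    | none => none
    | some v =>
      match pyChr? v with
      | none => none
      | some c => hex2stringGo strhex n (i + 2) (sb ++ [c])
  else some sb
termination_by n - i

def hex2string (strhex : List Char) : Option (List Char) :=
  if strhex.length % 2 ≠ 0 then none
  else hex2stringGo strhex strhex.length 0 []

-- the 'for c in psw' shift loop of simpledecrypt
def decryptShift (seed : Int) : List Char → List Char → Option (List Char)
  | sb, [] => some sb
  | sb, c :: rest =>
    match pyChr? ((c.toNat : Int) + seed) with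
    | none => none
    | some ch => decryptShift seed (sb ++ [ch]) rest

def simpledecrypt (s : String) (seed : Int) : String :=
  match hex2string s.toList with
  | none => ""          -- UIException / ValueError: excluded by Pre_
  | some psw =>
    match decryptShift seed [] psw with
    | none => ""        -- ValueError from chr: excluded by Pre_
    | some sb => String.ofList sb

-- ===== PORT B =====
def simpledecrypt_alt (s : String) (seed : Int) : String :=
  let cs := s.toList
  if cs.length % 2 ≠ 0 then ""    -- UIException: excluded by Pre_
  else
    match (PySem.List.pyRange 0 (cs.length : Int) 2).foldl (fun acc i =>
      match acc with
      | none => none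
      | some out =>
        match PySem.Int.ofCharsBase? (PySem.List.slice cs (some i) (some (i + 2))) 16 with
        | none => none
        | some v =>
          match pyChr? (v + seed) with
          | none => none
          | some ch => some (out ++ [ch])) (some []) with
    | none => ""                  -- ValueError: excluded by Pre_
    | some out => String.ofList out

-- ===== PRECONDITION & SPEC =====
-- the hex pairs s[0:2], s[2:4], … (any odd trailing char is dropped; Pre_ requires even length anyway)
def pairsOf : List Char → List (List Char)
  | a :: b :: rest => [a, b] :: pairsOf rest
  | _ => []

-- a pair decodes to some v (int(p,16) succeeds), chr(v) succeeds (0 ≤ v; v < 0xD800 always holds for a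
-- 2-char hex literal), and chr(v+seed) succeeds with a Lean-representable (non-surrogate) code point
def pairOK (seed : Int) (p : List Char) : Bool :=
  match PySem.Int.ofCharsBase? p 16 with
  | none => false
  | some v =>
    decide (0 ≤ v ∧ v < 55296 ∧ 0 ≤ v + seed ∧ (v + seed < 55296 ∨ (57344 ≤ v + seed ∧ v + seed ≤ 1114111)))

-- Pre_ excludes exactly the inputs where A raises (odd length → UIException; a pair that is not valid hex or
-- is negative, or a shifted code point outside chr's range → ValueError) and, additionally, the inputs where
-- A returns a string containing a lone UTF-16 surrogate (v+seed in [0xD800,0xDFFF]), a value B also produces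
-- but which is not representable as a Lean String.
def Pre_simpledecrypt (s : String) (seed : Int) : Prop :=
  s.toList.length % 2 = 0 ∧ (pairsOf s.toList).all (pairOK seed) = true
instance (s : String) (seed : Int) : Decidable (Pre_simpledecrypt s seed) := by
  unfold Pre_simpledecrypt; infer_instance

def pvWitness_simpledecrypt : String × Int := ("414243", 1)

def Spec_simpledecrypt (s : String) (seed : Int) (out : String) : Prop := out = simpledecrypt_alt s seed
instance (s : String) (seed : Int) (out : String) : Decidable (Spec_simpledecrypt s seed out) := by
  unfold Spec_simpledecrypt; infer_instance

-- ===== CLAIM (what is proved, stated in full; the proofs are below) =====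
def Claim_equal_simpledecrypt : Prop := ∀ (s : String) (seed : Int), Dom_simpledecrypt s seed → Pre_simpledecrypt s seed → Spec_simpledecrypt s seed (simpledecrypt s seed)

-- ===== LEMMAS AND PROOFS =====

-- the per-pair decoded char (before shifting) and the final output char of a pair
def decChar (p : List Char) : Char :=
  Char.ofNat ((PySem.Int.ofCharsBase? p 16).getD 0).toNat
def outChar (seed : Int) (p : List Char) : Char :=
  Char.ofNat (((PySem.Int.ofCharsBase? p 16).getD 0) + seed).toNat

theorem toNat_ofNat_valid (n : Nat) (hv : n.isValidChar) : (Char.ofNat n).toNat = n := by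
  rw [Char.ofNat, dif_pos hv]
  exact UInt32.toNat_ofNatLT

theorem pairOK_elim {seed : Int} {p : List Char} (h : pairOK seed p = true) :
    ∃ v, PySem.Int.ofCharsBase? p 16 = some v ∧ 0 ≤ v ∧ v < 55296 ∧ 0 ≤ v + seed ∧
      (v + seed < 55296 ∨ (57344 ≤ v + seed ∧ v + seed ≤ 1114111)) := by
  unfold pairOK at h
  cases hv : PySem.Int.ofCharsBase? p 16 with
  | none => rw [hv] at h; simp at h
  | some v => rw [hv] at h; simp at h; exact ⟨v, rfl, h.1, h.2.1, h.2.2.1, h.2.2.2⟩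

theorem slice_pair {cs : List Char} {i : Nat} {a b : Char} {rest : List Char}
    (hd : cs.drop i = a :: b :: rest) :
    PySem.List.slice cs (some (i : Int)) (some ((i : Int) + 2)) = [a, b] := by
  have h2 : ((i : Int) + 2) = ((i + 2 : Nat) : Int) := by push_cast; ring
  rw [h2, PySem.List.slice_natCast, hd]
  simp

theorem h2sGo_spec (seed : Int) : ∀ (l cs : List Char) (i : Nat) (sb : List Char),
    cs.drop i = l → i + l.length = cs.length →
    (pairsOf l).all (pairOK seed) = true → l.length % 2 = 0 →
    hex2stringGo cs cs.length i sb = some (sb ++ (pairsOf l).map decChar) := by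
  intro l
  induction l using pairsOf.induct with
  | case1 a b rest ih =>
    intro cs i sb hd hlen hall hpar
    simp only [pairsOf, List.all_cons, Bool.and_eq_true] at hall
    obtain ⟨v, hv, hv0, hv55, _, _⟩ := pairOK_elim hall.1
    have hlt : i < cs.length := by simp at hlen; omega
    rw [hex2stringGo, dif_pos hlt, slice_pair hd]
    have hch : pyChr? v = some (Char.ofNat v.toNat) := by
      unfold pyChr?; rw [if_pos ⟨hv0, Or.inl hv55⟩]
    have hd2 : cs.drop (i + 2) = rest := by
      rw [← List.drop_drop, hd]; rfl
    have hrec := ih cs (i + 2) (sb ++ [Char.ofNat v.toNat]) hd2 (by simp at hlen ⊢; omega)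
      hall.2 (by simp at hpar; omega)
    simp only [hv, hch, hrec]
    simp [pairsOf, decChar, hv]
  | case2 l hne =>
    intro cs i sb hd hlen hall hpar
    cases l with
    | nil =>
      have hnlt : ¬ i < cs.length := by simp at hlen; omega
      rw [hex2stringGo, dif_neg hnlt]
      simp [pairsOf]
    | cons a t =>
      cases t with
      | nil => simp at hpar
      | cons b r => exact (hne a b r rfl).elim

theorem decryptShift_spec (seed : Int) : ∀ (ps : List (List Char)) (sb : List Char),
    ps.all (pairOK seed) = true →
    decryptShift seed sb (ps.map decChar) = some (sb ++ ps.map (outChar seed)) := by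
  intro ps
  induction ps with
  | nil => intro sb _; simp [decryptShift]
  | cons p ps ih =>
    intro sb hall
    simp only [List.all_cons, Bool.and_eq_true] at hall
    obtain ⟨v, hv, hv0, hv55, hs0, hsr⟩ := pairOK_elim hall.1
    have hcn : ((decChar p).toNat : Int) = v := by
      unfold decChar; rw [hv]
      simp only [Option.getD_some]
      rw [toNat_ofNat_valid v.toNat (Or.inl (by omega))]
      omega
    have hch : pyChr? (v + seed) = some (Char.ofNat (v + seed).toNat) := by
      unfold pyChr?; rw [if_pos ⟨hs0, hsr⟩]
    simp only [List.map_cons, decryptShift, hcn, hch, ih _ hall.2]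
    simp [outChar, hv]

theorem pyRange_two_nil (a b : Int) (h : b ≤ a) : PySem.List.pyRange a b 2 = [] := by
  simp only [PySem.List.pyRange]
  norm_num
  intro h'
  omega

theorem pyRange_two_cons (a b : Int) (h : a < b) :
    PySem.List.pyRange a b 2 = a :: PySem.List.pyRange (a + 2) b 2 := by
  simp only [PySem.List.pyRange]
  norm_num [h]
  by_cases h2 : a + 2 < b
  · rw [if_pos h2]
    have hc : ((b - a + 2 - 1) / 2).toNat = ((b - (a + 2) + 2 - 1) / 2).toNat + 1 := by omega
    rw [hc, List.range_succ_eq_map]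
    simp only [List.map_cons, List.map_map]
    congr 1
    · norm_num
    · apply List.map_congr_left
      intro k _
      simp [Function.comp]
      ring
  · rw [if_neg h2]
    have hc : ((b - a + 2 - 1) / 2).toNat = 1 := by omega
    rw [hc]
    simp [List.range_succ]

theorem bfold_spec (seed : Int) : ∀ (l cs : List Char) (i : Nat) (acc : List Char),
    cs.drop i = l → i + l.length = cs.length →
    (pairsOf l).all (pairOK seed) = true → l.length % 2 = 0 →
    (PySem.List.pyRange (i : Int) (cs.length : Int) 2).foldl (fun acc j =>
      match acc with
      | none => none
      | some out =>
        match PySem.Int.ofCharsBase? (PySem.List.slice cs (some j) (some (j + 2))) 16 with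
        | none => none
        | some v =>
          match pyChr? (v + seed) with
          | none => none
          | some ch => some (out ++ [ch])) (some acc)
      = some (acc ++ (pairsOf l).map (outChar seed)) := by
  intro l
  induction l using pairsOf.induct with
  | case1 a b rest ih =>
    intro cs i acc hd hlen hall hpar
    simp only [pairsOf, List.all_cons, Bool.and_eq_true] at hall
    obtain ⟨v, hv, hv0, hv55, hs0, hsr⟩ := pairOK_elim hall.1
    have hlt : (i : Int) < (cs.length : Int) := by simp at hlen; omega
    rw [pyRange_two_cons _ _ hlt, List.foldl_cons]
    have hch : pyChr? (v + seed) = some (Char.ofNat (v + seed).toNat) := by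
      unfold pyChr?; rw [if_pos ⟨hs0, hsr⟩]
    simp only [slice_pair hd, hv, hch]
    have hd2 : cs.drop (i + 2) = rest := by
      rw [← List.drop_drop, hd]; rfl
    have hcast : (i : Int) + 2 = ((i + 2 : Nat) : Int) := by push_cast; ring
    rw [hcast, ih cs (i + 2) (acc ++ [Char.ofNat (v + seed).toNat]) hd2
      (by simp at hlen ⊢; omega) hall.2 (by simp at hpar; omega)]
    simp [pairsOf, outChar, hv]
  | case2 l hne =>
    intro cs i acc hd hlen hall hpar
    cases l with
    | nil =>
      have hle : (cs.length : Int) ≤ (i : Int) := by simp at hlen; omega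
      rw [pyRange_two_nil _ _ hle]
      simp [pairsOf]
    | cons a t =>
      cases t with
      | nil => simp at hpar
      | cons b r => exact (hne a b r rfl).elim

-- ===== VERDICT (by name: the statement is the Claim_ definition above) =====
theorem simpledecrypt_spec : Claim_equal_simpledecrypt := by
  unfold Claim_equal_simpledecrypt
  intro s seed _ hpre
  obtain ⟨hpar, hall⟩ := hpre
  unfold Spec_simpledecrypt simpledecrypt simpledecrypt_alt hex2string
  rw [if_neg (by omega), if_neg (by omega)]
  have hA := h2sGo_spec seed s.toList s.toList 0 [] (by simp) (by simp) hall hpar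
  have hS := decryptShift_spec seed (pairsOf s.toList) [] hall
  have hB := bfold_spec seed s.toList s.toList 0 [] (by simp) (by simp) hall hpar
  simp only [List.nil_append] at hA hS hB
  simp only [Int.natCast_zero] at hB
  simp only [hA, hS, hB]
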